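-- pv_equiv track=rewrite | github.com/juy4556/PythonAlgorithm | 잡동/ao/5.py | solution
-- ===== SOURCE A (Python) =====
-- def solution(n, tops):
--     answer = 0
--     length = 2 * n + 1
--     dp = [0 for _ in range(length)]
--     dp[0] = 1
--     if tops[0] == 1:
--         dp[1] = 3
--     else:
--         dp[1] = 2
--     for i in range(2, length):
--         if i & 1 and tops[i >> 1] & 1:
--             dp[i] = (dp[i - 1] * 2 + dp[i - 2]) % 10007
--         else:
--             dp[i] = (dp[i - 1] + dp[i - 2]) % 10007
--
--     answer = dp[-1]
--     return answer
-- ===== SOURCE B (Python) =====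
-- def solution(n, tops):
--     # Column-by-column rolling DP: keep only the last two dp cells instead of the 2n+1 array.
--     prev2, prev = 1, (3 if tops[0] == 1 else 2)
--     for k in range(1, n):
--         even = (prev + prev2) % 10007
--         if tops[k] & 1:
--             odd = (even * 2 + prev) % 10007
--         else:
--             odd = (even + prev) % 10007
--         prev2, prev = even, odd
--     return (prev + prev2) % 10007
-- ===== Notes on version B (the rewrite author's own statement) =====
-- stated objective: simpler
-- what changed: Replaces A's explicitly allocated size-(2n+1) dp array indexed 0..2n by a single pass over the n columns keeping only two rolling scalars (prev2, prev), computing each column's even cell and conditional odd cell in one step; O(1) space instead of O(n).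
import Mathlib
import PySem

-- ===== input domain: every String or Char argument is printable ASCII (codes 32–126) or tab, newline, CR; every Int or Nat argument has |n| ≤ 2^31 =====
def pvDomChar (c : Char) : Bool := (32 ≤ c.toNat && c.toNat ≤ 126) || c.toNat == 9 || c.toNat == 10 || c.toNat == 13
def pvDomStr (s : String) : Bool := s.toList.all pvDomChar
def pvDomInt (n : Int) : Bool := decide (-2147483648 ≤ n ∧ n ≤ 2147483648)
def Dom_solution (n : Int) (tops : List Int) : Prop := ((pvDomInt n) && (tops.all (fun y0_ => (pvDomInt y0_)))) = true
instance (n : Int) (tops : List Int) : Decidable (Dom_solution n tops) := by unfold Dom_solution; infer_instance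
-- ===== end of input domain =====

-- B replaces A's size-(2n+1) dp array by two rolling scalars in a single pass over the n columns (simpler, O(1) space).

-- ===== PORT A =====
-- Literal port of A: dp list of length 2n+1, dp[0]=1, dp[1] from tops[0], loop i = 2 .. 2n.
-- range(2, length) is ported as List.range' 2 (len-2) over Nat: exact, since length = 2n+1 and
-- all loop indices are nonnegative (for length < 2 both are empty).  On inputs where Python
-- raises (outside Pre_solution) List.set / List.getD default instead of raising.
def solution (n : Int) (tops : List Int) : Int :=
  let len : Nat := (2 * n + 1).toNat
  let dp : List Int := (List.replicate len (0 : Int)).set 0 1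
  let dp : List Int := dp.set 1 (if tops.getD 0 0 = 1 then 3 else 2)
  let dp : List Int := (List.range' 2 (len - 2)).foldl
    (fun dp i =>
      dp.set i (if i % 2 = 1 ∧ (tops.getD (i / 2) 0) % 2 ≠ 0
                then (dp.getD (i - 1) 0 * 2 + dp.getD (i - 2) 0) % 10007
                else (dp.getD (i - 1) 0 + dp.getD (i - 2) 0) % 10007)) dp
  dp.getD (len - 1) 0   -- dp[-1]

-- ===== PORT B =====
-- Literal port of B: rolling pair (prev2, prev); range(1, n) ported as List.range' 1 (n.toNat - 1).
def solution_alt (n : Int) (tops : List Int) : Int :=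
  let start : Int × Int := (1, if tops.getD 0 0 = 1 then 3 else 2)
  let p : Int × Int := (List.range' 1 (n.toNat - 1)).foldl
    (fun p k =>
      let even := (p.2 + p.1) % 10007
      let odd := if (tops.getD k 0) % 2 ≠ 0
                 then (even * 2 + p.2) % 10007
                 else (even + p.2) % 10007
      (even, odd)) start
  (p.2 + p.1) % 10007

-- ===== PRECONDITION & SPEC =====
-- Pre: exactly where Python A returns normally — n ≥ 1 (else dp[1] / dp[0] / tops[0] raises
-- IndexError) and tops has at least n entries (the loop reads tops[0..n-1]).
def Pre_solution (n : Int) (tops : List Int) : Prop := 1 ≤ n ∧ n ≤ (tops.length : Int)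
instance (n : Int) (tops : List Int) : Decidable (Pre_solution n tops) := by unfold Pre_solution; infer_instance
def pvWitness_solution : Int × List Int := (2, [1, 0])
def Spec_solution (n : Int) (tops : List Int) (out : Int) : Prop := out = solution_alt n tops
instance (n : Int) (tops : List Int) (out : Int) : Decidable (Spec_solution n tops out) := by unfold Spec_solution; infer_instance

-- ===== CLAIM (what is proved, stated in full; the proofs are below) =====
def Claim_equal_solution : Prop := ∀ (n : Int) (tops : List Int), Dom_solution n tops → Pre_solution n tops → Spec_solution n tops (solution n tops)

-- ===== LEMMAS AND PROOFS =====

theorem getD_set_self_int (l : List Int) (i : Nat) (v : Int) (h : i < l.length) :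
    (l.set i v).getD i 0 = v := by
  simp [List.getD_eq_getElem?_getD, List.getElem?_set_self h]

theorem getD_set_ne_int (l : List Int) (i j : Nat) (v : Int) (h : i ≠ j) :
    (l.set i v).getD j 0 = l.getD j 0 := by
  simp [List.getD_eq_getElem?_getD, List.getElem?_set_ne h]

-- The common recurrence: value of A's dp cell i (also what B's rolling pair tracks).
def fRec (tops : List Int) : Nat → Int
  | 0 => 1
  | 1 => if tops.getD 0 0 = 1 then 3 else 2
  | (i + 2) => if (i + 2) % 2 = 1 ∧ (tops.getD ((i + 2) / 2) 0) % 2 ≠ 0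
               then (fRec tops (i + 1) * 2 + fRec tops i) % 10007
               else (fRec tops (i + 1) + fRec tops i) % 10007

theorem fRec_even (tops : List Int) (k : Nat) :
    fRec tops (2 * k + 2) = (fRec tops (2 * k + 1) + fRec tops (2 * k)) % 10007 := by
  have h : 2 * k + 2 = (2 * k) + 2 := by ring
  rw [h, fRec]
  have : ((2 * k) + 2) % 2 = 0 := by omega
  simp [this]

theorem fRec_odd (tops : List Int) (k : Nat) :
    fRec tops (2 * k + 3) =
      if (tops.getD (k + 1) 0) % 2 ≠ 0
      then (fRec tops (2 * k + 2) * 2 + fRec tops (2 * k + 1)) % 10007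
      else (fRec tops (2 * k + 2) + fRec tops (2 * k + 1)) % 10007 := by
  have h : 2 * k + 3 = (2 * k + 1) + 2 := by ring
  rw [h, fRec]
  have h1 : ((2 * k + 1) + 2) % 2 = 1 := by omega
  have h2 : ((2 * k + 1) + 2) / 2 = k + 1 := by omega
  rw [h1, h2]
  simp [show 2 * k + 1 + 1 = 2 * k + 2 from by omega]

-- A-side invariant: after folding range' 2 c, dp has length len and agrees with fRec below 2 + c.
theorem solA_inv (tops : List Int) (len : Nat) (h3 : 3 ≤ len) (c : Nat) (hc : 2 + c ≤ len) :
    let dp0 := (((List.replicate len (0 : Int)).set 0 1).set 1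
                 (if tops.getD 0 0 = 1 then 3 else 2))
    let dp := (List.range' 2 c).foldl
      (fun dp i =>
        dp.set i (if i % 2 = 1 ∧ (tops.getD (i / 2) 0) % 2 ≠ 0
                  then (dp.getD (i - 1) 0 * 2 + dp.getD (i - 2) 0) % 10007
                  else (dp.getD (i - 1) 0 + dp.getD (i - 2) 0) % 10007)) dp0
    dp.length = len ∧ ∀ i, i < 2 + c → dp.getD i 0 = fRec tops i := by
  induction c with
  | zero =>
    have h0 : 0 < len := by omega
    have h1 : 1 < len := by omega
    refine ⟨by simp, ?_⟩
    intro i hi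
    interval_cases i
    · simp [List.getD_eq_getElem?_getD, h0, fRec]
    · simp [List.getD_eq_getElem?_getD, h1, fRec]
  | succ c ih =>
    have hc' : 2 + c ≤ len := by omega
    obtain ⟨hlen, hpref⟩ := ih hc'
    simp only [List.range'_1_concat, List.foldl_append, List.foldl_cons, List.foldl_nil]
    refine ⟨by simpa using hlen, ?_⟩
    intro i hi
    have hlt : 2 + c < len := by omega
    have hval :
        (if (2 + c) % 2 = 1 ∧ (tops.getD ((2 + c) / 2) 0) % 2 ≠ 0
         then (fRec tops (2 + c - 1) * 2 + fRec tops (2 + c - 2)) % 10007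
         else (fRec tops (2 + c - 1) + fRec tops (2 + c - 2)) % 10007) = fRec tops (2 + c) := by
      have h2 : 2 + c = c + 2 := by omega
      rw [h2, fRec]
      have e1 : c + 2 - 1 = c + 1 := by omega
      have e2 : c + 2 - 2 = c := by omega
      rw [e1, e2]
    by_cases hieq : i = 2 + c
    · subst hieq
      rw [hpref (2 + c - 1) (by omega), hpref (2 + c - 2) (by omega),
          getD_set_self_int _ _ _ (by rw [hlen]; exact hlt)]
      exact hval
    · rw [getD_set_ne_int _ _ _ _ (by omega)]
      exact hpref i (by omega)

-- B-side invariant: the rolling pair after c steps is (fRec (2c), fRec (2c+1)).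
theorem solB_inv (tops : List Int) (c : Nat) :
    (List.range' 1 c).foldl
      (fun (p : Int × Int) k =>
        let even := (p.2 + p.1) % 10007
        let odd := if (tops.getD k 0) % 2 ≠ 0
                   then (even * 2 + p.2) % 10007
                   else (even + p.2) % 10007
        (even, odd))
      ((1 : Int), if tops.getD 0 0 = 1 then 3 else 2)
    = (fRec tops (2 * c), fRec tops (2 * c + 1)) := by
  induction c with
  | zero => simp [fRec]
  | succ c ih =>
    rw [List.range'_1_concat, List.foldl_append, ih]
    simp only [List.foldl_cons, List.foldl_nil]
    have heven : (fRec tops (2 * c + 1) + fRec tops (2 * c)) % 10007 = fRec tops (2 * c + 2) :=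
      (fRec_even tops c).symm
    have hodd := fRec_odd tops c
    have e2 : 2 * (c + 1) + 1 = 2 * c + 3 := by omega
    have e1 : 2 * (c + 1) = 2 * c + 2 := by omega
    rw [e2, e1, hodd]
    have e3 : 1 + c = c + 1 := by omega
    refine Prod.ext ?_ ?_
    · simpa using heven
    · simp only [e3, heven]

-- Both ports compute fRec (2 * n.toNat) when n ≥ 1.
theorem solA_eq (n : Int) (tops : List Int) (hn : 1 ≤ n) :
    solution n tops = fRec tops (2 * n.toNat) := by
  have hm1 : 1 ≤ n.toNat := by omega
  have hlen : (2 * n + 1).toNat = 2 * n.toNat + 1 := by omega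
  obtain ⟨-, hpref⟩ :=
    solA_inv tops (2 * n.toNat + 1) (by omega) (2 * n.toNat + 1 - 2) (by omega)
  simp only [solution, hlen]
  have e : 2 * n.toNat + 1 - 1 = 2 * n.toNat := by omega
  rw [e]
  exact hpref (2 * n.toNat) (by omega)

theorem solB_eq (n : Int) (tops : List Int) (hn : 1 ≤ n) :
    solution_alt n tops = fRec tops (2 * n.toNat) := by
  have hm1 : 1 ≤ n.toNat := by omega
  simp only [solution_alt]
  rw [solB_inv tops (n.toNat - 1)]
  have heven := fRec_even tops (n.toNat - 1)
  have e2 : 2 * (n.toNat - 1) + 2 = 2 * n.toNat := by omega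
  rw [e2] at heven
  simpa using heven.symm

-- ===== VERDICT (by name: the statement is the Claim_ definition above) =====
theorem solution_spec : Claim_equal_solution := by
  intro n tops _ hpre
  unfold Spec_solution
  obtain ⟨hn, -⟩ := hpre
  rw [solA_eq n tops hn, solB_eq n tops hn]
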